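-- pv_equiv track=rewrite | github.com/PythonTut/exercise_rock_paper_scissors | solution.py | landing_spot
-- ===== SOURCE A (Python) =====
-- from typing import List, Tuple, Dict
--
-- ladders: List[Tuple[int, int]] = [
--     (6, 27), (14, 19), (21, 53), (31, 42), (33, 38), (46, 62),
--     (51, 59), (57, 96), (65, 85), (68, 80), (70, 76), (92, 98)
-- ]
--
-- def landing_spot(start: int, eyes: int) -> int:
--     direct_spot = start + eyes
--
--     if direct_spot > 100:
--         direct_spot = 200 - direct_spot  # == 100 - (direct_spot - 100)
--
--     for (ladder_start, ladder_target) in ladders: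
--         if direct_spot == ladder_start:
--             return ladder_target
--         elif direct_spot == ladder_target:
--             return ladder_start
--
--     return direct_spot
-- ===== SOURCE B (Python) =====
-- from typing import List, Tuple, Dict
--
-- ladders: List[Tuple[int, int]] = [
--     (6, 27), (14, 19), (21, 53), (31, 42), (33, 38), (46, 62),
--     (51, 59), (57, 96), (65, 85), (68, 80), (70, 76), (92, 98)
-- ]
--
-- # Sorted bidirectional endpoint table (24 entries, all keys distinct),
-- # built once at module load; looked up by binary search.
-- _entries: List[Tuple[int, int]] = sorted(
--     [(a, b) for a, b in ladders] + [(b, a) for a, b in ladders], key=lambda p: p[0]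
-- )
--
-- def landing_spot(start: int, eyes: int) -> int:
--     d = start + eyes
--     if d > 100:
--         d = 200 - d
--     lo, hi = 0, len(_entries) - 1
--     while lo <= hi:
--         mid = (lo + hi) // 2
--         k, v = _entries[mid]
--         if k == d:
--             return v
--         elif k < d:
--             lo = mid + 1
--         else:
--             hi = mid - 1
--     return d
-- ===== Notes on version B (the rewrite author's own statement) =====
-- stated objective: alternative
-- what changed: A's two-branch linear scan over the ladder pairs is replaced by a module-level table of all 24 (endpoint, partner) entries sorted by endpoint, queried with a hand-written lo/hi binary-search loop.
import Mathlib
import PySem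

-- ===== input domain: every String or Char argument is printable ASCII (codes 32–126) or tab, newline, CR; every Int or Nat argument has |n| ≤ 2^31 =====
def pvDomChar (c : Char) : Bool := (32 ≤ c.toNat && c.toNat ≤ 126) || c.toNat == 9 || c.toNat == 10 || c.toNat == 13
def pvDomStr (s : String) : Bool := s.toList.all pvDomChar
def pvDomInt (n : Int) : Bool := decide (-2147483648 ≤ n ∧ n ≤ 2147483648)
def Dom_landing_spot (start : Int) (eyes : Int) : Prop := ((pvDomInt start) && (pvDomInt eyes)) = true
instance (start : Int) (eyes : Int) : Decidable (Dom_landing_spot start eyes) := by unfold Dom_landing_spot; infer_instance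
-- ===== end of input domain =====

-- B replaces A's linear scan over the ladder pairs with a sorted bidirectional endpoint table built once at module load and a hand-written binary search over it (alternative algorithm; no speed claim at k = 12).


-- ===== PORT A =====
def pvLadders : List (Int × Int) :=
  [(6, 27), (14, 19), (21, 53), (31, 42), (33, 38), (46, 62),
   (51, 59), (57, 96), (65, 85), (68, 80), (70, 76), (92, 98)]

-- A's for-loop with its two early returns, as structural recursion over the same list
def pvLadderLoop : List (Int × Int) → Int → Int
  | [], d => d
  | (ls, lt) :: rest, d =>
      if d = ls then lt
      else if d = lt then ls
      else pvLadderLoop rest d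

def landing_spot (start : Int) (eyes : Int) : Int :=
  let direct_spot := start + eyes
  let direct_spot := if direct_spot > 100 then 200 - direct_spot else direct_spot
  pvLadderLoop pvLadders direct_spot

-- ===== PORT B =====
-- Source B's module-level _entries: both directions of every ladder, sorted(..., key=lambda p: p[0])
def pvEntries : List (Int × Int) :=
  PySem.List.sorted (pvLadders ++ pvLadders.map (fun p => (p.2, p.1))) (fun p => p.1) false

-- Source B's while-loop; the fuel only makes the loop total (hi - lo shrinks every round, so
-- 25 rounds always cover lo = 0, hi = 23)
def pvBSearch : Nat → Int → Int → Int → Int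
  | 0, _, _, d => d
  | fuel + 1, lo, hi, d =>
      if lo ≤ hi then
        let mid := PySem.Int.floordiv (lo + hi) 2
        -- _entries[mid]: mid is always in range here, so the getD default is never used
        let kv := (PySem.List.pyGet? pvEntries mid).getD (0, 0)
        if kv.1 = d then kv.2
        else if kv.1 < d then pvBSearch fuel (mid + 1) hi d
        else pvBSearch fuel lo (mid - 1) d
      else d

def landing_spot_alt (start : Int) (eyes : Int) : Int :=
  let d := start + eyes
  let d := if d > 100 then 200 - d else d
  pvBSearch 25 0 ((pvEntries.length : Int) - 1) d

-- ===== PRECONDITION & SPEC =====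
def Spec_landing_spot (start : Int) (eyes : Int) (out : Int) : Prop := out = landing_spot_alt start eyes
instance (start : Int) (eyes : Int) (out : Int) : Decidable (Spec_landing_spot start eyes out) := by unfold Spec_landing_spot; infer_instance

-- ===== CLAIM (what is proved, stated in full; the proofs are below) =====
def Claim_equal_landing_spot : Prop := ∀ (start : Int) (eyes : Int), Dom_landing_spot start eyes → Spec_landing_spot start eyes (landing_spot start eyes)

-- ===== LEMMAS AND PROOFS =====
-- when d is none of the 24 ladder endpoints, A's scan falls through and returns d
theorem pv_loop_self (d : Int) (h : d ≠ 6 ∧ d ≠ 14 ∧ d ≠ 19 ∧ d ≠ 21 ∧ d ≠ 27 ∧ d ≠ 31 ∧ d ≠ 33 ∧ d ≠ 38 ∧ d ≠ 42 ∧ d ≠ 46 ∧ d ≠ 51 ∧ d ≠ 53 ∧ d ≠ 57 ∧ d ≠ 59 ∧ d ≠ 62 ∧ d ≠ 65 ∧ d ≠ 68 ∧ d ≠ 70 ∧ d ≠ 76 ∧ d ≠ 80 ∧ d ≠ 85 ∧ d ≠ 92 ∧ d ≠ 96 ∧ d ≠ 98) : pvLadderLoop pvLadders d = d := by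
  obtain ⟨_,_,_,_,_,_,_,_,_,_,_,_,_,_,_,_,_,_,_,_,_,_,_,_⟩ := h
  simp only [pvLadderLoop, pvLadders]
  split_ifs <;> omega

-- the scan and the binary search agree on every query: the proof walks the (concrete)
-- search tree, splitting d against the probed key at each node
set_option maxHeartbeats 2000000 in
theorem pv_core (d : Int) : pvLadderLoop pvLadders d = pvBSearch 25 0 23 d := by
  rcases lt_trichotomy d 53 with h1 | h1 | h1
  · rw [show pvBSearch 25 0 23 d = pvBSearch 24 0 10 d from by
      show (if (53:Int) = d then (21:Int) else if (53:Int) < d then pvBSearch 24 12 23 d else pvBSearch 24 0 10 d) = _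
      rw [if_neg (by omega), if_neg (by omega)]]
    rcases lt_trichotomy d 31 with h2 | h2 | h2
    · rw [show pvBSearch 24 0 10 d = pvBSearch 23 0 4 d from by
        show (if (31:Int) = d then (42:Int) else if (31:Int) < d then pvBSearch 23 6 10 d else pvBSearch 23 0 4 d) = _
        rw [if_neg (by omega), if_neg (by omega)]]
      rcases lt_trichotomy d 19 with h3 | h3 | h3
      · rw [show pvBSearch 23 0 4 d = pvBSearch 22 0 1 d from by
          show (if (19:Int) = d then (14:Int) else if (19:Int) < d then pvBSearch 22 3 4 d else pvBSearch 22 0 1 d) = _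
          rw [if_neg (by omega), if_neg (by omega)]]
        rcases lt_trichotomy d 6 with h4 | h4 | h4
        · rw [show pvBSearch 22 0 1 d = pvBSearch 21 0 (-1) d from by
            show (if (6:Int) = d then (27:Int) else if (6:Int) < d then pvBSearch 21 1 1 d else pvBSearch 21 0 (-1) d) = _
            rw [if_neg (by omega), if_neg (by omega)]]
          rw [pv_loop_self d (by omega)]; rfl
        · subst h4; decide
        · rw [show pvBSearch 22 0 1 d = pvBSearch 21 1 1 d from by
            show (if (6:Int) = d then (27:Int) else if (6:Int) < d then pvBSearch 21 1 1 d else pvBSearch 21 0 (-1) d) = _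
            rw [if_neg (by omega), if_pos (by omega)]]
          rcases lt_trichotomy d 14 with h5 | h5 | h5
          · rw [show pvBSearch 21 1 1 d = pvBSearch 20 1 0 d from by
              show (if (14:Int) = d then (19:Int) else if (14:Int) < d then pvBSearch 20 2 1 d else pvBSearch 20 1 0 d) = _
              rw [if_neg (by omega), if_neg (by omega)]]
            rw [pv_loop_self d (by omega)]; rfl
          · subst h5; decide
          · rw [show pvBSearch 21 1 1 d = pvBSearch 20 2 1 d from by
              show (if (14:Int) = d then (19:Int) else if (14:Int) < d then pvBSearch 20 2 1 d else pvBSearch 20 1 0 d) = _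
              rw [if_neg (by omega), if_pos (by omega)]]
            rw [pv_loop_self d (by omega)]; rfl
      · subst h3; decide
      · rw [show pvBSearch 23 0 4 d = pvBSearch 22 3 4 d from by
          show (if (19:Int) = d then (14:Int) else if (19:Int) < d then pvBSearch 22 3 4 d else pvBSearch 22 0 1 d) = _
          rw [if_neg (by omega), if_pos (by omega)]]
        rcases lt_trichotomy d 21 with h4 | h4 | h4
        · rw [show pvBSearch 22 3 4 d = pvBSearch 21 3 2 d from by
            show (if (21:Int) = d then (53:Int) else if (21:Int) < d then pvBSearch 21 4 4 d else pvBSearch 21 3 2 d) = _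
            rw [if_neg (by omega), if_neg (by omega)]]
          rw [pv_loop_self d (by omega)]; rfl
        · subst h4; decide
        · rw [show pvBSearch 22 3 4 d = pvBSearch 21 4 4 d from by
            show (if (21:Int) = d then (53:Int) else if (21:Int) < d then pvBSearch 21 4 4 d else pvBSearch 21 3 2 d) = _
            rw [if_neg (by omega), if_pos (by omega)]]
          rcases lt_trichotomy d 27 with h5 | h5 | h5
          · rw [show pvBSearch 21 4 4 d = pvBSearch 20 4 3 d from by
              show (if (27:Int) = d then (6:Int) else if (27:Int) < d then pvBSearch 20 5 4 d else pvBSearch 20 4 3 d) = _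
              rw [if_neg (by omega), if_neg (by omega)]]
            rw [pv_loop_self d (by omega)]; rfl
          · subst h5; decide
          · rw [show pvBSearch 21 4 4 d = pvBSearch 20 5 4 d from by
              show (if (27:Int) = d then (6:Int) else if (27:Int) < d then pvBSearch 20 5 4 d else pvBSearch 20 4 3 d) = _
              rw [if_neg (by omega), if_pos (by omega)]]
            rw [pv_loop_self d (by omega)]; rfl
    · subst h2; decide
    · rw [show pvBSearch 24 0 10 d = pvBSearch 23 6 10 d from by
        show (if (31:Int) = d then (42:Int) else if (31:Int) < d then pvBSearch 23 6 10 d else pvBSearch 23 0 4 d) = _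
        rw [if_neg (by omega), if_pos (by omega)]]
      rcases lt_trichotomy d 42 with h3 | h3 | h3
      · rw [show pvBSearch 23 6 10 d = pvBSearch 22 6 7 d from by
          show (if (42:Int) = d then (31:Int) else if (42:Int) < d then pvBSearch 22 9 10 d else pvBSearch 22 6 7 d) = _
          rw [if_neg (by omega), if_neg (by omega)]]
        rcases lt_trichotomy d 33 with h4 | h4 | h4
        · rw [show pvBSearch 22 6 7 d = pvBSearch 21 6 5 d from by
            show (if (33:Int) = d then (38:Int) else if (33:Int) < d then pvBSearch 21 7 7 d else pvBSearch 21 6 5 d) = _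
            rw [if_neg (by omega), if_neg (by omega)]]
          rw [pv_loop_self d (by omega)]; rfl
        · subst h4; decide
        · rw [show pvBSearch 22 6 7 d = pvBSearch 21 7 7 d from by
            show (if (33:Int) = d then (38:Int) else if (33:Int) < d then pvBSearch 21 7 7 d else pvBSearch 21 6 5 d) = _
            rw [if_neg (by omega), if_pos (by omega)]]
          rcases lt_trichotomy d 38 with h5 | h5 | h5
          · rw [show pvBSearch 21 7 7 d = pvBSearch 20 7 6 d from by
              show (if (38:Int) = d then (33:Int) else if (38:Int) < d then pvBSearch 20 8 7 d else pvBSearch 20 7 6 d) = _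
              rw [if_neg (by omega), if_neg (by omega)]]
            rw [pv_loop_self d (by omega)]; rfl
          · subst h5; decide
          · rw [show pvBSearch 21 7 7 d = pvBSearch 20 8 7 d from by
              show (if (38:Int) = d then (33:Int) else if (38:Int) < d then pvBSearch 20 8 7 d else pvBSearch 20 7 6 d) = _
              rw [if_neg (by omega), if_pos (by omega)]]
            rw [pv_loop_self d (by omega)]; rfl
      · subst h3; decide
      · rw [show pvBSearch 23 6 10 d = pvBSearch 22 9 10 d from by
          show (if (42:Int) = d then (31:Int) else if (42:Int) < d then pvBSearch 22 9 10 d else pvBSearch 22 6 7 d) = _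
          rw [if_neg (by omega), if_pos (by omega)]]
        rcases lt_trichotomy d 46 with h4 | h4 | h4
        · rw [show pvBSearch 22 9 10 d = pvBSearch 21 9 8 d from by
            show (if (46:Int) = d then (62:Int) else if (46:Int) < d then pvBSearch 21 10 10 d else pvBSearch 21 9 8 d) = _
            rw [if_neg (by omega), if_neg (by omega)]]
          rw [pv_loop_self d (by omega)]; rfl
        · subst h4; decide
        · rw [show pvBSearch 22 9 10 d = pvBSearch 21 10 10 d from by
            show (if (46:Int) = d then (62:Int) else if (46:Int) < d then pvBSearch 21 10 10 d else pvBSearch 21 9 8 d) = _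
            rw [if_neg (by omega), if_pos (by omega)]]
          rcases lt_trichotomy d 51 with h5 | h5 | h5
          · rw [show pvBSearch 21 10 10 d = pvBSearch 20 10 9 d from by
              show (if (51:Int) = d then (59:Int) else if (51:Int) < d then pvBSearch 20 11 10 d else pvBSearch 20 10 9 d) = _
              rw [if_neg (by omega), if_neg (by omega)]]
            rw [pv_loop_self d (by omega)]; rfl
          · subst h5; decide
          · rw [show pvBSearch 21 10 10 d = pvBSearch 20 11 10 d from by
              show (if (51:Int) = d then (59:Int) else if (51:Int) < d then pvBSearch 20 11 10 d else pvBSearch 20 10 9 d) = _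
              rw [if_neg (by omega), if_pos (by omega)]]
            rw [pv_loop_self d (by omega)]; rfl
  · subst h1; decide
  · rw [show pvBSearch 25 0 23 d = pvBSearch 24 12 23 d from by
      show (if (53:Int) = d then (21:Int) else if (53:Int) < d then pvBSearch 24 12 23 d else pvBSearch 24 0 10 d) = _
      rw [if_neg (by omega), if_pos (by omega)]]
    rcases lt_trichotomy d 70 with h2 | h2 | h2
    · rw [show pvBSearch 24 12 23 d = pvBSearch 23 12 16 d from by
        show (if (70:Int) = d then (76:Int) else if (70:Int) < d then pvBSearch 23 18 23 d else pvBSearch 23 12 16 d) = _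
        rw [if_neg (by omega), if_neg (by omega)]]
      rcases lt_trichotomy d 62 with h3 | h3 | h3
      · rw [show pvBSearch 23 12 16 d = pvBSearch 22 12 13 d from by
          show (if (62:Int) = d then (46:Int) else if (62:Int) < d then pvBSearch 22 15 16 d else pvBSearch 22 12 13 d) = _
          rw [if_neg (by omega), if_neg (by omega)]]
        rcases lt_trichotomy d 57 with h4 | h4 | h4
        · rw [show pvBSearch 22 12 13 d = pvBSearch 21 12 11 d from by
            show (if (57:Int) = d then (96:Int) else if (57:Int) < d then pvBSearch 21 13 13 d else pvBSearch 21 12 11 d) = _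
            rw [if_neg (by omega), if_neg (by omega)]]
          rw [pv_loop_self d (by omega)]; rfl
        · subst h4; decide
        · rw [show pvBSearch 22 12 13 d = pvBSearch 21 13 13 d from by
            show (if (57:Int) = d then (96:Int) else if (57:Int) < d then pvBSearch 21 13 13 d else pvBSearch 21 12 11 d) = _
            rw [if_neg (by omega), if_pos (by omega)]]
          rcases lt_trichotomy d 59 with h5 | h5 | h5
          · rw [show pvBSearch 21 13 13 d = pvBSearch 20 13 12 d from by
              show (if (59:Int) = d then (51:Int) else if (59:Int) < d then pvBSearch 20 14 13 d else pvBSearch 20 13 12 d) = _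
              rw [if_neg (by omega), if_neg (by omega)]]
            rw [pv_loop_self d (by omega)]; rfl
          · subst h5; decide
          · rw [show pvBSearch 21 13 13 d = pvBSearch 20 14 13 d from by
              show (if (59:Int) = d then (51:Int) else if (59:Int) < d then pvBSearch 20 14 13 d else pvBSearch 20 13 12 d) = _
              rw [if_neg (by omega), if_pos (by omega)]]
            rw [pv_loop_self d (by omega)]; rfl
      · subst h3; decide
      · rw [show pvBSearch 23 12 16 d = pvBSearch 22 15 16 d from by
          show (if (62:Int) = d then (46:Int) else if (62:Int) < d then pvBSearch 22 15 16 d else pvBSearch 22 12 13 d) = _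
          rw [if_neg (by omega), if_pos (by omega)]]
        rcases lt_trichotomy d 65 with h4 | h4 | h4
        · rw [show pvBSearch 22 15 16 d = pvBSearch 21 15 14 d from by
            show (if (65:Int) = d then (85:Int) else if (65:Int) < d then pvBSearch 21 16 16 d else pvBSearch 21 15 14 d) = _
            rw [if_neg (by omega), if_neg (by omega)]]
          rw [pv_loop_self d (by omega)]; rfl
        · subst h4; decide
        · rw [show pvBSearch 22 15 16 d = pvBSearch 21 16 16 d from by
            show (if (65:Int) = d then (85:Int) else if (65:Int) < d then pvBSearch 21 16 16 d else pvBSearch 21 15 14 d) = _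
            rw [if_neg (by omega), if_pos (by omega)]]
          rcases lt_trichotomy d 68 with h5 | h5 | h5
          · rw [show pvBSearch 21 16 16 d = pvBSearch 20 16 15 d from by
              show (if (68:Int) = d then (80:Int) else if (68:Int) < d then pvBSearch 20 17 16 d else pvBSearch 20 16 15 d) = _
              rw [if_neg (by omega), if_neg (by omega)]]
            rw [pv_loop_self d (by omega)]; rfl
          · subst h5; decide
          · rw [show pvBSearch 21 16 16 d = pvBSearch 20 17 16 d from by
              show (if (68:Int) = d then (80:Int) else if (68:Int) < d then pvBSearch 20 17 16 d else pvBSearch 20 16 15 d) = _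
              rw [if_neg (by omega), if_pos (by omega)]]
            rw [pv_loop_self d (by omega)]; rfl
    · subst h2; decide
    · rw [show pvBSearch 24 12 23 d = pvBSearch 23 18 23 d from by
        show (if (70:Int) = d then (76:Int) else if (70:Int) < d then pvBSearch 23 18 23 d else pvBSearch 23 12 16 d) = _
        rw [if_neg (by omega), if_pos (by omega)]]
      rcases lt_trichotomy d 85 with h3 | h3 | h3
      · rw [show pvBSearch 23 18 23 d = pvBSearch 22 18 19 d from by
          show (if (85:Int) = d then (65:Int) else if (85:Int) < d then pvBSearch 22 21 23 d else pvBSearch 22 18 19 d) = _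
          rw [if_neg (by omega), if_neg (by omega)]]
        rcases lt_trichotomy d 76 with h4 | h4 | h4
        · rw [show pvBSearch 22 18 19 d = pvBSearch 21 18 17 d from by
            show (if (76:Int) = d then (70:Int) else if (76:Int) < d then pvBSearch 21 19 19 d else pvBSearch 21 18 17 d) = _
            rw [if_neg (by omega), if_neg (by omega)]]
          rw [pv_loop_self d (by omega)]; rfl
        · subst h4; decide
        · rw [show pvBSearch 22 18 19 d = pvBSearch 21 19 19 d from by
            show (if (76:Int) = d then (70:Int) else if (76:Int) < d then pvBSearch 21 19 19 d else pvBSearch 21 18 17 d) = _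
            rw [if_neg (by omega), if_pos (by omega)]]
          rcases lt_trichotomy d 80 with h5 | h5 | h5
          · rw [show pvBSearch 21 19 19 d = pvBSearch 20 19 18 d from by
              show (if (80:Int) = d then (68:Int) else if (80:Int) < d then pvBSearch 20 20 19 d else pvBSearch 20 19 18 d) = _
              rw [if_neg (by omega), if_neg (by omega)]]
            rw [pv_loop_self d (by omega)]; rfl
          · subst h5; decide
          · rw [show pvBSearch 21 19 19 d = pvBSearch 20 20 19 d from by
              show (if (80:Int) = d then (68:Int) else if (80:Int) < d then pvBSearch 20 20 19 d else pvBSearch 20 19 18 d) = _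
              rw [if_neg (by omega), if_pos (by omega)]]
            rw [pv_loop_self d (by omega)]; rfl
      · subst h3; decide
      · rw [show pvBSearch 23 18 23 d = pvBSearch 22 21 23 d from by
          show (if (85:Int) = d then (65:Int) else if (85:Int) < d then pvBSearch 22 21 23 d else pvBSearch 22 18 19 d) = _
          rw [if_neg (by omega), if_pos (by omega)]]
        rcases lt_trichotomy d 96 with h4 | h4 | h4
        · rw [show pvBSearch 22 21 23 d = pvBSearch 21 21 21 d from by
            show (if (96:Int) = d then (57:Int) else if (96:Int) < d then pvBSearch 21 23 23 d else pvBSearch 21 21 21 d) = _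
            rw [if_neg (by omega), if_neg (by omega)]]
          rcases lt_trichotomy d 92 with h5 | h5 | h5
          · rw [show pvBSearch 21 21 21 d = pvBSearch 20 21 20 d from by
              show (if (92:Int) = d then (98:Int) else if (92:Int) < d then pvBSearch 20 22 21 d else pvBSearch 20 21 20 d) = _
              rw [if_neg (by omega), if_neg (by omega)]]
            rw [pv_loop_self d (by omega)]; rfl
          · subst h5; decide
          · rw [show pvBSearch 21 21 21 d = pvBSearch 20 22 21 d from by
              show (if (92:Int) = d then (98:Int) else if (92:Int) < d then pvBSearch 20 22 21 d else pvBSearch 20 21 20 d) = _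
              rw [if_neg (by omega), if_pos (by omega)]]
            rw [pv_loop_self d (by omega)]; rfl
        · subst h4; decide
        · rw [show pvBSearch 22 21 23 d = pvBSearch 21 23 23 d from by
            show (if (96:Int) = d then (57:Int) else if (96:Int) < d then pvBSearch 21 23 23 d else pvBSearch 21 21 21 d) = _
            rw [if_neg (by omega), if_pos (by omega)]]
          rcases lt_trichotomy d 98 with h5 | h5 | h5
          · rw [show pvBSearch 21 23 23 d = pvBSearch 20 23 22 d from by
              show (if (98:Int) = d then (92:Int) else if (98:Int) < d then pvBSearch 20 24 23 d else pvBSearch 20 23 22 d) = _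
              rw [if_neg (by omega), if_neg (by omega)]]
            rw [pv_loop_self d (by omega)]; rfl
          · subst h5; decide
          · rw [show pvBSearch 21 23 23 d = pvBSearch 20 24 23 d from by
              show (if (98:Int) = d then (92:Int) else if (98:Int) < d then pvBSearch 20 24 23 d else pvBSearch 20 23 22 d) = _
              rw [if_neg (by omega), if_pos (by omega)]]
            rw [pv_loop_self d (by omega)]; rfl

-- ===== VERDICT (by name: the statement is the Claim_ definition above) =====
theorem landing_spot_spec : Claim_equal_landing_spot := by
  intro start eyes _
  unfold Spec_landing_spot landing_spot landing_spot_alt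
  rw [show ((pvEntries.length : Int) - 1) = 23 from by decide]
  exact pv_core _
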